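-- pv_equiv track=rewrite | github.com/wiki-ruhan/TriChokro | update_site_v2.py | update_internal_links
-- ===== SOURCE A (Python) =====
-- pages = ['index', 'founder', 'pathfinder', 'trambulance', 'blog', 'contact', 'resources', 'privacy', 'metadata']
--
-- langs = {
--     'en': {'name': 'EN', 'suffix': ''},
--     'bn': {'name': 'BN', 'suffix': '_bn'},
--     'de': {'name': 'DE', 'suffix': '_de'},
--     'es': {'name': 'ES', 'suffix': '_es'},
--     'zh': {'name': 'ZH', 'suffix': '_zh'},
--     'ja': {'name': 'JA', 'suffix': '_ja'}
-- }
--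
-- def update_internal_links(content, lang):
--     if lang == 'en': return content
--     suffix = langs[lang]['suffix']
--
--     # Identify internal links: href="page.html" or href="page.html#section"
--     # We need to replace page.html with page_suffix.html
--
--     for p in pages:
--         # Pattern: href="page.html" or href="page.html?..." or href="page.html#..."
--         # We use a negative lookbehind to ensure we don't double replace if run multiple times (though we rewrite file each time)
--         # But we are reading from file which might already have _de.html if we are iterating.
--         # Actually, we should be careful.
--         # The safest way is to target the exact string "page.html"
--
--         # Replace href="page.html" with href="page_suffix.html"
--         # We need to handle 'index.html' -> 'index_de.html'
--
--         pattern = f'href="{p}.html"'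
--         replacement = f'href="{p}{suffix}.html"'
--         content = content.replace(pattern, replacement)
--
--         pattern = f'href="{p}.html#'
--         replacement = f'href="{p}{suffix}.html#'
--         content = content.replace(pattern, replacement)
--
--         pattern = f'href="{p}.html?'
--         replacement = f'href="{p}{suffix}.html?'
--         content = content.replace(pattern, replacement)
--
--     return content
-- ===== SOURCE B (Python) =====
-- pages = ['index', 'founder', 'pathfinder', 'trambulance', 'blog', 'contact', 'resources', 'privacy', 'metadata']
--
-- langs = {
--     'en': {'name': 'EN', 'suffix': ''},
--     'bn': {'name': 'BN', 'suffix': '_bn'},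
--     'de': {'name': 'DE', 'suffix': '_de'},
--     'es': {'name': 'ES', 'suffix': '_es'},
--     'zh': {'name': 'ZH', 'suffix': '_zh'},
--     'ja': {'name': 'JA', 'suffix': '_ja'}
-- }
--
-- def update_internal_links(content, lang):
--     # Single left-to-right scan instead of 27 sequential global replaces.
--     if lang == 'en': return content
--     suffix = langs[lang]['suffix']
--     out = []
--     i, n = 0, len(content)
--     while i < n:
--         hit = None
--         for p in pages:
--             if content.startswith('href="' + p + '.html', i) and \
--                content[i + 11 + len(p): i + 12 + len(p)] in ('"', '#', '?'):
--                 hit = p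
--                 break
--         if hit is None:
--             out.append(content[i])
--             i += 1
--         else:
--             out.append('href="' + hit + suffix + '.html')
--             i += 11 + len(hit)
--     return ''.join(out)
-- ===== Notes on version B (the rewrite author's own statement) =====
-- stated objective: alternative
-- what changed: A makes 27 sequential global str.replace passes (one per page/delimiter pattern); B makes a single left-to-right scan that matches 'href="<page>.html' plus a '"'/'#'/'?' delimiter at each position and inserts the language suffix as it goes.
import Mathlib
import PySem

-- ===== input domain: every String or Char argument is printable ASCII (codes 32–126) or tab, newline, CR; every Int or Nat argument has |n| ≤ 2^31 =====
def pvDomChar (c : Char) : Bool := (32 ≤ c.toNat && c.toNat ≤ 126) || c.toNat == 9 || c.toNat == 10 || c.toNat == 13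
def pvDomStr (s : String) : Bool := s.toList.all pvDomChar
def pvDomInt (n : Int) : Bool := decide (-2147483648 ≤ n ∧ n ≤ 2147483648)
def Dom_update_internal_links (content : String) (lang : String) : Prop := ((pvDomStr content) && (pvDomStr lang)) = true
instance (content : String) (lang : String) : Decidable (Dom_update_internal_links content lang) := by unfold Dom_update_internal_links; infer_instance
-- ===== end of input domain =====

-- B replaces A's 27 sequential global str.replace passes by one left-to-right scan; objective: alternative (same result, different algorithm).

-- shared string pieces (the literals both Pythons build with f-strings / concatenation)
def pvH : List Char := ['h', 'r', 'e', 'f', '=', '"']          -- 'href="'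
def pvT : List Char := ['.', 'h', 't', 'm', 'l']               -- '.html'
def pvPages : List (List Char) :=
  ["index".toList, "founder".toList, "pathfinder".toList, "trambulance".toList, "blog".toList,
   "contact".toList, "resources".toList, "privacy".toList, "metadata".toList]
def pvLangs : PySem.Dict String (PySem.Dict String String) :=
  PySem.Dict.ofList
    [("en", PySem.Dict.ofList [("name", "EN"), ("suffix", "")]),
     ("bn", PySem.Dict.ofList [("name", "BN"), ("suffix", "_bn")]),
     ("de", PySem.Dict.ofList [("name", "DE"), ("suffix", "_de")]),
     ("es", PySem.Dict.ofList [("name", "ES"), ("suffix", "_es")]),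
     ("zh", PySem.Dict.ofList [("name", "ZH"), ("suffix", "_zh")]),
     ("ja", PySem.Dict.ofList [("name", "JA"), ("suffix", "_ja")])]
-- f'href="{p}.html{d}'  and  f'href="{p}{suffix}.html{d}'
def pvPat (p : List Char) (d : Char) : List Char := pvH ++ p ++ pvT ++ [d]
def pvRep (sfx p : List Char) (d : Char) : List Char := pvH ++ p ++ sfx ++ pvT ++ [d]

-- ===== PORT A =====
-- loop body of A: the three content.replace(...) calls for one page p
def pvStep3 (sfx : List Char) (c : List Char) (p : List Char) : List Char :=
  let c1 := PySem.Chars.replace c (pvPat p '"') (pvRep sfx p '"')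
  let c2 := PySem.Chars.replace c1 (pvPat p '#') (pvRep sfx p '#')
  PySem.Chars.replace c2 (pvPat p '?') (pvRep sfx p '?')

def update_internal_links (content : String) (lang : String) : String :=
  if lang == "en" then content
  else
    match pvLangs.get? lang with
    | none => content          -- Python raises KeyError here; excluded by Pre_
    | some m =>
      let suffix := m.getD "suffix" ""
      String.ofList (pvPages.foldl (pvStep3 suffix.toList) content.toList)

-- ===== PORT B =====
-- B's inner 'for p in pages' test at position i (here: at the head of s)
def pvMatchPage (s : List Char) : Option (List Char) :=
  pvPages.find? (fun p =>
    (pvH ++ p ++ pvT).isPrefixOf s &&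
    (match (s.drop (11 + p.length)).head? with
     | some c => c == '"' || c == '#' || c == '?'
     | none => false))

-- B's while loop: one pass over the characters
def pvScan (sfx : List Char) (s : List Char) : List Char :=
  match h : pvMatchPage s with
  | some p => pvH ++ p ++ sfx ++ pvT ++ pvScan sfx (s.drop (11 + p.length))
  | none =>
    match s with
    | [] => []
    | c :: t => c :: pvScan sfx t
termination_by s.length
decreasing_by
  · have hp := List.find?_some h
    simp only [Bool.and_eq_true, List.isPrefixOf_iff_prefix] at hp
    have hlen := hp.1.length_le
    simp only [List.length_append, List.length_drop] at *
    have h6 : pvH.length = 6 := by decide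
    have h5 : pvT.length = 5 := by decide
    omega
  · simp

def update_internal_links_alt (content : String) (lang : String) : String :=
  if lang == "en" then content
  else
    match pvLangs.get? lang with
    | none => content          -- Python raises KeyError here; excluded by Pre_
    | some m =>
      String.ofList (pvScan (m.getD "suffix" "").toList content.toList)

-- ===== PRECONDITION & SPEC =====
-- Pre_ excludes exactly the langs outside the langs dict, on which both Pythons raise KeyError.
def Pre_update_internal_links (content : String) (lang : String) : Prop :=
  lang ∈ (["en", "bn", "de", "es", "zh", "ja"] : List String)
instance (content : String) (lang : String) : Decidable (Pre_update_internal_links content lang) := by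
  unfold Pre_update_internal_links; infer_instance

def pvWitness_update_internal_links : String × String := ("<a href=\"index.html#top\">Home</a>", "bn")

def Spec_update_internal_links (content : String) (lang : String) (out : String) : Prop :=
  out = update_internal_links_alt content lang
instance (content : String) (lang : String) (out : String) : Decidable (Spec_update_internal_links content lang out) := by
  unfold Spec_update_internal_links; infer_instance

-- ===== CLAIM (what is proved, stated in full; the proofs are below) =====
def Claim_equal_update_internal_links : Prop := ∀ (content : String) (lang : String), Dom_update_internal_links content lang → Pre_update_internal_links content lang → Spec_update_internal_links content lang (update_internal_links content lang)

-- ===== LEMMAS AND PROOFS =====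

-- proof-only helpers
def pvDelims : List Char := ['\"', '#', '?']
def pvRt (p : List Char) (d : Char) : List Char := ['r', 'e', 'f', '=', '"'] ++ p ++ pvT ++ [d]
def pvSuffixes : List (List Char) := ["_bn".toList, "_de".toList, "_es".toList, "_zh".toList, "_ja".toList]
def pvRepl (c : List Char) (q : List Char × List Char) : List Char := PySem.Chars.replace c q.1 q.2
def pvTriple (sfx : List Char) (p : List Char) : List (List Char × List Char) :=
  [(pvPat p '"', pvRep sfx p '"'), (pvPat p '#', pvRep sfx p '#'), (pvPat p '?', pvRep sfx p '?')]
def pvPairs (sfx : List Char) : List (List Char × List Char) := pvPages.flatMap (pvTriple sfx)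
def pvIncompB (a b : List Char) : Bool := !(a.isPrefixOf b) && !(b.isPrefixOf a)
-- no "hr" (and no lone trailing 'h') anywhere after position 0 of u
def pvNoHr (u : List Char) : Bool :=
  (List.range u.length).all fun k =>
    k == 0 || !((u[k]? == some 'h') && (k + 1 == u.length || u[k+1]? == some 'r'))

-- ---------- basic facts about PySem.Chars.replace ----------

theorem pv_go_zero (old new l acc) : PySem.Chars.replace.go old new 0 l acc = acc.reverse ++ l := rfl
theorem pv_go_succ_nil (old new fuel acc) : PySem.Chars.replace.go old new (fuel+1) [] acc = acc.reverse := rfl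
theorem pv_go_succ_cons (old new fuel c t acc) : PySem.Chars.replace.go old new (fuel+1) (c::t) acc =
    if old.isPrefixOf (c::t) = true then
      PySem.Chars.replace.go old new fuel (List.drop old.length (c::t)) (new.reverse ++ acc)
    else PySem.Chars.replace.go old new fuel t (c::acc) := rfl

theorem pv_go_acc (old new : List Char) (fuel : Nat) : ∀ (l acc : List Char),
    PySem.Chars.replace.go old new fuel l acc = acc.reverse ++ PySem.Chars.replace.go old new fuel l [] := by
  induction fuel with
  | zero => intro l acc; rw [pv_go_zero, pv_go_zero]; simp
  | succ fuel ih =>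
    intro l acc
    cases l with
    | nil => rw [pv_go_succ_nil, pv_go_succ_nil]; simp
    | cons c t =>
      rw [pv_go_succ_cons, pv_go_succ_cons]
      by_cases hp : old.isPrefixOf (c :: t) = true
      · rw [if_pos hp, if_pos hp,
          ih (List.drop old.length (c :: t)) (new.reverse ++ acc),
          ih (List.drop old.length (c :: t)) (new.reverse ++ [])]
        simp
      · rw [if_neg hp, if_neg hp, ih t (c :: acc), ih t (c :: [])]
        simp

theorem pv_go_fuel (old new : List Char) (hold : old ≠ []) : ∀ (fuel : Nat), ∀ (l : List Char),
    l.length ≤ fuel → PySem.Chars.replace.go old new fuel l [] = PySem.Chars.replace.go old new l.length l [] := by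
  intro fuel
  induction fuel using Nat.strong_induction_on with
  | _ fuel ih =>
    intro l hl
    cases l with
    | nil =>
      cases fuel with
      | zero => rfl
      | succ fuel => rw [pv_go_succ_nil, show ([] : List Char).length = 0 from rfl, pv_go_zero]; simp
    | cons c t =>
      cases fuel with
      | zero => simp at hl
      | succ fuel =>
        simp only [List.length_cons] at hl
        rw [pv_go_succ_cons]
        conv_rhs => rw [show (c :: t).length = t.length + 1 from rfl, pv_go_succ_cons]
        have hone : 0 < old.length := by
          cases old
          · exact absurd rfl hold
          · simp
        by_cases hp : old.isPrefixOf (c :: t) = true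
        · rw [if_pos hp, if_pos hp]
          have hlen : old.length ≤ (c :: t).length := (List.isPrefixOf_iff_prefix.mp hp).length_le
          simp only [List.length_cons] at hlen
          rw [pv_go_acc old new fuel, pv_go_acc old new t.length]
          congr 1
          have hdl : (List.drop old.length (c :: t)).length = t.length + 1 - old.length := by simp
          rw [ih fuel (by omega) _ (by rw [hdl]; omega),
              ih t.length (by omega) _ (by rw [hdl]; omega)]
        · rw [if_neg hp, if_neg hp,
            pv_go_acc old new fuel t (c :: []), pv_go_acc old new t.length t (c :: [])]
          congr 1
          exact ih fuel (by omega) t (by omega)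

theorem pv_replace_eq_go (old new s : List Char) (hold : old ≠ []) :
    PySem.Chars.replace s old new = PySem.Chars.replace.go old new s.length s [] := by
  rw [PySem.Chars.replace]; simp [List.isEmpty_iff, hold]

theorem pv_replace_nil (old new : List Char) (hold : old ≠ []) :
    PySem.Chars.replace [] old new = [] := by
  rw [pv_replace_eq_go _ _ _ hold]; rfl

theorem pv_replace_cons (old new : List Char) (hold : old ≠ []) (c : Char) (t : List Char)
    (h : ¬ old <+: (c :: t)) : PySem.Chars.replace (c :: t) old new = c :: PySem.Chars.replace t old new := by
  rw [pv_replace_eq_go _ _ _ hold, pv_replace_eq_go _ _ _ hold]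
  have hp : ¬ old.isPrefixOf (c :: t) = true := by
    rw [List.isPrefixOf_iff_prefix]; exact h
  rw [show (c :: t).length = t.length + 1 from rfl, pv_go_succ_cons, if_neg hp,
    pv_go_acc old new t.length t (c :: [])]
  simp

theorem pv_replace_prefix (old new x : List Char) (hold : old ≠ []) :
    PySem.Chars.replace (old ++ x) old new = new ++ PySem.Chars.replace x old new := by
  rw [pv_replace_eq_go _ _ _ hold, pv_replace_eq_go _ _ _ hold]
  cases hct : old ++ x with
  | nil => exact absurd hct (by simp [hold])
  | cons c t =>
    have hone : 0 < old.length := by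
      cases old
      · exact absurd rfl hold
      · simp
    have hlt : old.length + x.length = t.length + 1 := by
      have := congrArg List.length hct
      simpa using this
    rw [show (c :: t).length = t.length + 1 from rfl, pv_go_succ_cons]
    have hp : old.isPrefixOf (c :: t) = true := by
      rw [List.isPrefixOf_iff_prefix, ← hct]; exact List.prefix_append old x
    rw [if_pos hp]
    have hdrop : List.drop old.length (c :: t) = x := by rw [← hct]; exact List.drop_left
    rw [hdrop, pv_go_acc, pv_go_fuel old new hold t.length x (by omega)]
    simp

-- first-match decomposition of a single replace
theorem pv_replace_first_match (old new : List Char) (hold : old ≠ []) : ∀ (y : List Char),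
    PySem.Chars.replace y old new = y ∨
    ∃ u w, y = u ++ old ++ w ∧ PySem.Chars.replace y old new = u ++ new ++ PySem.Chars.replace w old new := by
  intro y
  induction y with
  | nil => left; exact pv_replace_nil old new hold
  | cons c t ih =>
    by_cases hp : old <+: (c :: t)
    · obtain ⟨w, hw⟩ := hp
      right
      exact ⟨[], w, by simp [← hw], by rw [← hw, pv_replace_prefix _ _ _ hold]; simp⟩
    · rw [pv_replace_cons _ _ hold _ _ hp]
      rcases ih with h | ⟨u, w, hy, hr⟩
      · left; rw [h]
      · right
        exact ⟨c :: u, w, by simp [hy], by rw [hr]; simp⟩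

-- ---------- generic prefix utilities ----------

theorem pv_prefix_of_prefix_append {a b c : List Char} (h : a <+: b ++ c) (hl : a.length ≤ b.length) :
    a <+: b :=
  List.prefix_of_prefix_length_le h (List.prefix_append b c) hl

theorem pv_not_prefix_append (a u : List Char) (h1 : ¬ a <+: u) (h2 : ¬ u <+: a) :
    ∀ z, ¬ a <+: u ++ z := by
  intro z hz
  rcases Nat.le_total a.length u.length with hl | hl
  · exact h1 (pv_prefix_of_prefix_append hz hl)
  · exact h2 (List.prefix_of_prefix_length_le (List.prefix_append u z) hz hl)

theorem pv_incompB_not_prefix_append {a u : List Char} (h : pvIncompB a u = true) :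
    ∀ z, ¬ a <+: u ++ z := by
  simp only [pvIncompB, Bool.and_eq_true, Bool.not_eq_true', ← Bool.not_eq_true,
    List.isPrefixOf_iff_prefix] at h
  exact pv_not_prefix_append a u h.1 h.2

-- a pattern 'h'::'r'::w cannot match at any position 1 ≤ k < u.length when pvNoHr u
theorem pv_noHr_no_match {u : List Char} (hu : pvNoHr u = true) (w : List Char) :
    ∀ k, 1 ≤ k → k < u.length → ∀ z, ¬ ('h' :: 'r' :: w) <+: (u.drop k ++ z) := by
  intro k hk1 hk z hpre
  have hdrop := List.drop_eq_getElem_cons hk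
  rw [hdrop] at hpre
  simp only [List.cons_append, List.cons_prefix_cons] at hpre
  obtain ⟨hh, hpre2⟩ := hpre
  simp only [pvNoHr, List.all_eq_true, List.mem_range] at hu
  have := hu k hk
  simp only [beq_iff_eq, Bool.or_eq_true, Bool.not_eq_true', Bool.and_eq_false_iff] at this
  rcases this with h0 | hbad
  · omega
  · rcases hbad with hne | hnr
    · rw [List.getElem?_eq_getElem hk] at hne; simp at hne; exact hne hh.symm
    · simp only [Bool.or_eq_false_iff, beq_eq_false_iff_ne] at hnr
      obtain ⟨hlen, hr⟩ := hnr
      have hk1' : k + 1 < u.length := by omega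
      rw [List.drop_eq_getElem_cons hk1'] at hpre2
      simp only [List.cons_append, List.cons_prefix_cons] at hpre2
      rw [List.getElem?_eq_getElem hk1'] at hr; simp at hr
      exact hr hpre2.1.symm

-- ---------- distributing one replace over an immune block u ----------

theorem pv_replace_append_distrib (old new : List Char) (hold : old ≠ []) :
    ∀ (u x : List Char), (∀ k, k < u.length → ∀ z, ¬ old <+: (u.drop k ++ z)) →
    PySem.Chars.replace (u ++ x) old new = u ++ PySem.Chars.replace x old new := by
  intro u
  induction u with
  | nil => intro x _; simp
  | cons c u' ih =>
    intro x himm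
    have h0 : ¬ old <+: (c :: (u' ++ x)) := by
      have := himm 0 (by simp) x
      simpa using this
    rw [List.cons_append, pv_replace_cons _ _ hold _ _ h0, ih x (fun k hk z => by
      have := himm (k + 1) (by simp; omega) z
      simpa using this)]
    simp

-- ---------- a replace never creates a new occurrence of an "hr"-free target rt ----------

theorem pv_not_prefix_replace (old new rt : List Char) (hold : old ≠ []) (n : Nat)
    (hcore : old.take n = new.take n) (hn6 : 6 ≤ n) (hnp : n ≤ old.length)
    (hH : pvH <+: new) (hrt : ∀ m, ¬ pvH <+: rt.drop m) :
    ∀ y, ¬ rt <+: y → ¬ rt <+: PySem.Chars.replace y old new := by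
  intro y hy
  rcases pv_replace_first_match old new hold y with heq | ⟨u, w, hyd, hrd⟩
  · rw [heq]; exact hy
  · rw [hrd]
    intro hpre
    have hnnew : n ≤ new.length := by
      have h1 : (old.take n).length = n := by simp; omega
      have h2 : (new.take n).length = min n new.length := by simp
      rw [hcore] at h1; rw [h1] at h2; omega
    by_cases hlen : rt.length ≤ u.length + n
    · -- the occurrence lies inside the region where old and new agree
      apply hy
      have hsplit : (u ++ new.take n) ++ (new.drop n ++ PySem.Chars.replace w old new)
          = u ++ new ++ PySem.Chars.replace w old new := by
        simp only [List.append_assoc]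
        rw [← List.append_assoc (new.take n), List.take_append_drop]
      rw [← hsplit] at hpre
      have hpre2 : rt <+: u ++ new.take n := by
        apply pv_prefix_of_prefix_append hpre
        simp
        omega
      rw [← hcore] at hpre2
      rw [hyd]
      refine hpre2.trans ?_
      rw [List.append_assoc]
      exact (List.prefix_append_right_inj u).mpr ((List.take_prefix n old).trans (List.prefix_append old w))
    · -- the occurrence would contain 'href="' at offset u.length inside rt
      apply hrt u.length
      obtain ⟨ext, hext⟩ := hpre
      have hule : u.length ≤ rt.length := by omega
      have hdrop : rt.drop u.length ++ ext = new ++ PySem.Chars.replace w old new := by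
        have h := congrArg (List.drop u.length) hext
        rw [List.drop_append, Nat.sub_eq_zero_of_le hule, List.drop_zero] at h
        have h2 : List.drop u.length (u ++ new ++ PySem.Chars.replace w old new)
            = new ++ PySem.Chars.replace w old new := by
          rw [List.append_assoc]; exact List.drop_left
        rw [h, h2]
      have hHpre : pvH <+: rt.drop u.length ++ ext := by
        rw [hdrop]
        exact hH.trans (List.prefix_append new _)
      apply pv_prefix_of_prefix_append hHpre
      have : (List.drop u.length rt).length = rt.length - u.length := by simp
      rw [this]
      have hH6 : pvH.length = 6 := by decide
      omega

-- ---------- structural facts about the 27 patterns ----------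

theorem pv_pat_ne_nil (p : List Char) (d : Char) : pvPat p d ≠ [] := by
  simp [pvPat, pvH]

theorem pv_pat_eq_cons (p : List Char) (d : Char) : pvPat p d = 'h' :: pvRt p d := rfl

theorem pv_pat_eq_hr (p : List Char) (d : Char) :
    pvPat p d = 'h' :: 'r' :: (['e', 'f', '=', '"'] ++ p ++ pvT ++ [d]) := rfl

theorem pv_core_take (sfx p : List Char) (d : Char) :
    (pvPat p d).take (6 + p.length) = (pvRep sfx p d).take (6 + p.length) := by
  have h1 : pvPat p d = (pvH ++ p) ++ (pvT ++ [d]) := by simp [pvPat]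
  have h2 : pvRep sfx p d = (pvH ++ p) ++ (sfx ++ pvT ++ [d]) := by simp [pvRep]
  have hl : (pvH ++ p).length = 6 + p.length := by simp [pvH]; omega
  rw [h1, h2, ← hl, List.take_left, List.take_left]

theorem pv_H_prefix_rep (sfx p : List Char) (d : Char) : pvH <+: pvRep sfx p d := by
  simp only [pvRep, List.append_assoc]
  exact List.prefix_append pvH _

-- decide-checked bundles
theorem pv_chk_rt : (pvPages.all fun p => pvDelims.all fun d =>
    (List.range (pvRt p d).length).all fun m => !(pvH.isPrefixOf ((pvRt p d).drop m))) = true := by decide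

theorem pv_chk_noHr : (pvSuffixes.all fun sfx => pvPages.all fun p => pvDelims.all fun d =>
    pvNoHr (pvPat p d) && pvNoHr (pvRep sfx p d)) = true := by decide

theorem pv_chk_incomp_pat : (pvDelims.all fun d => pvDelims.all fun d2 =>
    pvPages.all fun p => pvPages.all fun p2 =>
      (decide (p2 = p) && decide (d2 = d)) || pvIncompB (pvPat p2 d2) (pvPat p d)) = true := by decide

theorem pv_chk_incomp_rep : (pvSuffixes.all fun sfx => pvDelims.all fun d => pvDelims.all fun d2 =>
    pvPages.all fun p => pvPages.all fun p2 => pvIncompB (pvPat p2 d2) (pvRep sfx p d)) = true := by decide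

theorem pv_pages_nodup : pvPages.Nodup := by decide

theorem pv_rt_no_H {p : List Char} (hp : p ∈ pvPages) {d : Char} (hd : d ∈ pvDelims) :
    ∀ m, ¬ pvH <+: (pvRt p d).drop m := by
  intro m
  by_cases hm : m < (pvRt p d).length
  · have h := pv_chk_rt
    simp only [List.all_eq_true, List.mem_range] at h
    have := h p hp d hd m hm
    simp only [Bool.not_eq_true', ← Bool.not_eq_true, List.isPrefixOf_iff_prefix] at this
    exact this
  · rw [List.drop_eq_nil_of_le (by omega)]
    intro hpre
    have := hpre.length_le
    simp [pvH] at this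

theorem pv_noHr_pat {sfx : List Char} (hs : sfx ∈ pvSuffixes) {p : List Char} (hp : p ∈ pvPages)
    {d : Char} (hd : d ∈ pvDelims) : pvNoHr (pvPat p d) = true ∧ pvNoHr (pvRep sfx p d) = true := by
  have h := pv_chk_noHr
  simp only [List.all_eq_true, Bool.and_eq_true] at h
  exact h sfx hs p hp d hd

-- membership unpacking for pvPairs
theorem pv_mem_pairs {sfx : List Char} {q : List Char × List Char} (hq : q ∈ pvPairs sfx) :
    ∃ p d, p ∈ pvPages ∧ d ∈ pvDelims ∧ q = (pvPat p d, pvRep sfx p d) := by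
  simp only [pvPairs, List.mem_flatMap, pvTriple] at hq
  obtain ⟨p, hp, hq⟩ := hq
  simp only [List.mem_cons] at hq
  rcases hq with h | h | h | h
  · exact ⟨p, '"', hp, by decide, h⟩
  · exact ⟨p, '#', hp, by decide, h⟩
  · exact ⟨p, '?', hp, by decide, h⟩
  · simp at h

-- ---------- fold-level lemmas ----------

theorem pv_fold_nil (Q : List (List Char × List Char)) (h : ∀ q ∈ Q, q.1 ≠ []) :
    Q.foldl pvRepl [] = [] := by
  induction Q with
  | nil => rfl
  | cons q Q ih =>
    rw [List.foldl_cons]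
    rw [show pvRepl [] q = [] from pv_replace_nil q.1 q.2 (h q (by simp))]
    exact ih (fun q hq => h q (by simp [hq]))

theorem pv_fold_append (Q : List (List Char × List Char)) (hne : ∀ q ∈ Q, q.1 ≠ []) :
    ∀ (u : List Char), (∀ q ∈ Q, ∀ k, k < u.length → ∀ z, ¬ q.1 <+: (u.drop k ++ z)) →
    ∀ x, Q.foldl pvRepl (u ++ x) = u ++ Q.foldl pvRepl x := by
  induction Q with
  | nil => intro u _ x; rfl
  | cons q Q ih =>
    intro u himm x
    rw [List.foldl_cons, List.foldl_cons]
    rw [show pvRepl (u ++ x) q = u ++ pvRepl x q from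
      pv_replace_append_distrib q.1 q.2 (hne q (by simp)) u x (himm q (by simp))]
    exact ih (fun q hq => hne q (by simp [hq])) u (fun q hq => himm q (by simp [hq])) (pvRepl x q)

theorem pv_immune_of_incomp_noHr {pat u : List Char}
    (hpat : ∃ w, pat = 'h' :: 'r' :: w)
    (h0 : pvIncompB pat u = true) (hu : pvNoHr u = true) :
    ∀ k, k < u.length → ∀ z, ¬ pat <+: (u.drop k ++ z) := by
  intro k hk z
  rcases Nat.eq_zero_or_pos k with h | h
  · subst h; rw [List.drop_zero]; exact pv_incompB_not_prefix_append h0 z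
  · obtain ⟨w, hw⟩ := hpat
    rw [hw]
    exact pv_noHr_no_match hu w k h hk z

-- incomparability lookups from the decide bundles
theorem pv_incomp_pat {p2 p : List Char} {d2 d : Char} (hp2 : p2 ∈ pvPages) (hd2 : d2 ∈ pvDelims)
    (hp : p ∈ pvPages) (hd : d ∈ pvDelims) (hne : ¬ (p2 = p ∧ d2 = d)) :
    pvIncompB (pvPat p2 d2) (pvPat p d) = true := by
  have h := pv_chk_incomp_pat
  simp only [List.all_eq_true, Bool.or_eq_true, Bool.and_eq_true, decide_eq_true_eq] at h
  rcases h d hd d2 hd2 p hp p2 hp2 with h12 | h2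
  · exact absurd h12 hne
  · exact h2

theorem pv_incomp_rep {sfx p2 p : List Char} {d2 d : Char} (hs : sfx ∈ pvSuffixes)
    (hp2 : p2 ∈ pvPages) (hd2 : d2 ∈ pvDelims) (hp : p ∈ pvPages) (hd : d ∈ pvDelims) :
    pvIncompB (pvPat p2 d2) (pvRep sfx p d) = true := by
  have h := pv_chk_incomp_rep
  simp only [List.all_eq_true] at h
  exact h sfx hs d hd d2 hd2 p hp p2 hp2

-- a fold whose every pattern is incomparable with the head block u leaves u intact
theorem pv_fold_immune {sfx : List Char} (Q : List (List Char × List Char))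
    (hQ : ∀ q ∈ Q, q ∈ pvPairs sfx) (u : List Char) (hu : pvNoHr u = true)
    (hinc : ∀ q ∈ Q, pvIncompB q.1 u = true) :
    ∀ x, Q.foldl pvRepl (u ++ x) = u ++ Q.foldl pvRepl x := by
  intro x
  apply pv_fold_append
  · intro q hq
    obtain ⟨p2, d2, _, _, hq2⟩ := pv_mem_pairs (hQ q hq)
    rw [hq2]; exact pv_pat_ne_nil p2 d2
  · intro q hq k hk z
    obtain ⟨p2, d2, hp2, hd2, hq2⟩ := pv_mem_pairs (hQ q hq)
    have hq1 : q.1 = pvPat p2 d2 := by rw [hq2]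
    rw [hq1]
    apply pv_immune_of_incomp_noHr ⟨_, pv_pat_eq_hr p2 d2⟩ (hq1 ▸ hinc q hq) hu k hk z

theorem pv_triple_subset {sfx p : List Char} (hp : p ∈ pvPages) :
    ∀ q ∈ pvTriple sfx p, q ∈ pvPairs sfx := by
  intro q hq
  exact List.mem_flatMap.mpr ⟨p, hp, hq⟩

-- one page's three replaces on a block starting with its matched pattern
theorem pv_triple_match {sfx : List Char} (hs : sfx ∈ pvSuffixes) {p : List Char} (hp : p ∈ pvPages)
    {d : Char} (hd : d ∈ pvDelims) :
    ∀ x, (pvTriple sfx p).foldl pvRepl (pvPat p d ++ x) = pvRep sfx p d ++ (pvTriple sfx p).foldl pvRepl x := by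
  intro x
  have hnoHrP : pvNoHr (pvPat p d) = true := (pv_noHr_pat hs hp hd).1
  have hnoHrR : pvNoHr (pvRep sfx p d) = true := (pv_noHr_pat hs hp hd).2
  have hne : pvPat p d ≠ [] := pv_pat_ne_nil p d
  have hstep_other : ∀ (d2 : Char), d2 ∈ pvDelims → d2 ≠ d → ∀ y,
      pvRepl (pvPat p d ++ y) (pvPat p d2, pvRep sfx p d2) = pvPat p d ++ pvRepl y (pvPat p d2, pvRep sfx p d2) := by
    intro d2 hd2 hne2 y
    apply pv_replace_append_distrib _ _ (pv_pat_ne_nil p d2)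
    exact pv_immune_of_incomp_noHr ⟨_, pv_pat_eq_hr p d2⟩
      (pv_incomp_pat hp hd2 hp hd (by simp [hne2])) hnoHrP
  have hstep_rep : ∀ (d2 : Char), d2 ∈ pvDelims → ∀ y,
      pvRepl (pvRep sfx p d ++ y) (pvPat p d2, pvRep sfx p d2) = pvRep sfx p d ++ pvRepl y (pvPat p d2, pvRep sfx p d2) := by
    intro d2 hd2 y
    apply pv_replace_append_distrib _ _ (pv_pat_ne_nil p d2)
    exact pv_immune_of_incomp_noHr ⟨_, pv_pat_eq_hr p d2⟩ (pv_incomp_rep hs hp hd2 hp hd) hnoHrR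
  have hstep_self : ∀ y, pvRepl (pvPat p d ++ y) (pvPat p d, pvRep sfx p d)
      = pvRep sfx p d ++ pvRepl y (pvPat p d, pvRep sfx p d) := by
    intro y
    exact pv_replace_prefix _ _ y hne
  simp only [pvDelims, List.mem_cons, List.not_mem_nil, or_false] at hd
  rcases hd with hd | hd | hd <;> subst hd <;>
    simp only [pvTriple, List.foldl_cons, List.foldl_nil]
  · rw [hstep_self, hstep_rep '#' (by decide), hstep_rep '?' (by decide)]
  · rw [hstep_other '\"' (by decide) (by decide), hstep_self, hstep_rep '?' (by decide)]
  · rw [hstep_other '\"' (by decide) (by decide), hstep_other '#' (by decide) (by decide), hstep_self]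

-- the whole 27-pair fold rewrites a matched block at the head
theorem pv_fold_match {sfx : List Char} (hs : sfx ∈ pvSuffixes)
    {p : List Char} (hp : p ∈ pvPages) {d : Char} (hd : d ∈ pvDelims) :
    ∀ x, (pvPairs sfx).foldl pvRepl (pvPat p d ++ x) = pvRep sfx p d ++ (pvPairs sfx).foldl pvRepl x := by
  intro x
  obtain ⟨L1, L2, hL⟩ := List.append_of_mem hp
  have hnd := pv_pages_nodup
  rw [hL, List.nodup_append] at hnd
  have hpL1 : p ∉ L1 := fun hmem => hnd.2.2 p hmem p (by simp) rfl
  have hmemL : ∀ p1, p1 ∈ L1 ∨ p1 ∈ L2 → p1 ∈ pvPages := by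
    intro p1 h1
    rw [hL]
    rcases h1 with h1 | h1
    · exact List.mem_append_left _ h1
    · exact List.mem_append_right _ (by simp [h1])
  have hne1 : ∀ p1 ∈ L1, ¬ p1 = p := fun p1 h1 he => hpL1 (he ▸ h1)
  have hne2 : ∀ p1 ∈ L2, ¬ p1 = p := by
    intro p1 h1 he
    subst he
    exact (List.nodup_cons.mp hnd.2.1).1 h1
  have hPairs : pvPairs sfx
      = L1.flatMap (pvTriple sfx) ++ (pvTriple sfx p ++ L2.flatMap (pvTriple sfx)) := by
    rw [pvPairs, hL, List.flatMap_append, List.flatMap_cons]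
  have hnoHrP : pvNoHr (pvPat p d) = true := (pv_noHr_pat hs hp hd).1
  have hnoHrR : pvNoHr (pvRep sfx p d) = true := (pv_noHr_pat hs hp hd).2
  have himmune_flat : ∀ (L : List (List Char)), (∀ p1 ∈ L, p1 ∈ pvPages) →
      (∀ p1 ∈ L, ¬ p1 = p) → ∀ (u : List Char), pvNoHr u = true →
      (u = pvPat p d ∨ u = pvRep sfx p d) → ∀ y,
      (L.flatMap (pvTriple sfx)).foldl pvRepl (u ++ y) = u ++ (L.flatMap (pvTriple sfx)).foldl pvRepl y := by
    intro L hsub hnep u hu huP y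
    apply pv_fold_immune _ (fun q hq => by
      obtain ⟨p1, h1, harm⟩ := List.mem_flatMap.mp hq
      exact pv_triple_subset (hsub p1 h1) q harm) u hu
    intro q hq
    obtain ⟨p1, h1, harm⟩ := List.mem_flatMap.mp hq
    simp only [pvTriple, List.mem_cons, List.not_mem_nil, or_false] at harm
    have hq1 : ∃ d2, d2 ∈ pvDelims ∧ q.1 = pvPat p1 d2 := by
      rcases harm with h | h | h
      · exact ⟨'\"', by decide, by rw [h]⟩
      · exact ⟨'#', by decide, by rw [h]⟩
      · exact ⟨'?', by decide, by rw [h]⟩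
    obtain ⟨d2, hd2, hq1⟩ := hq1
    rw [hq1]
    rcases huP with rfl | rfl
    · exact pv_incomp_pat (hsub p1 h1) hd2 hp hd (fun hc => hnep p1 h1 hc.1)
    · exact pv_incomp_rep hs (hsub p1 h1) hd2 hp hd
  rw [hPairs, List.foldl_append, List.foldl_append, List.foldl_append, List.foldl_append,
    himmune_flat L1 (fun p1 h1 => hmemL p1 (Or.inl h1)) hne1 (pvPat p d) hnoHrP (Or.inl rfl) x,
    pv_triple_match hs hp hd ((L1.flatMap (pvTriple sfx)).foldl pvRepl x),
    himmune_flat L2 (fun p1 h1 => hmemL p1 (Or.inr h1)) hne2 (pvRep sfx p d) hnoHrR (Or.inr rfl) _]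

-- invariant: no rtail matches at the head
def pvInv (y : List Char) : Prop := ∀ p ∈ pvPages, ∀ d ∈ pvDelims, ¬ pvRt p d <+: y

theorem pv_inv_preserved (sfx p2 : List Char) (d2 : Char)
    {y : List Char} (hy : pvInv y) : pvInv (PySem.Chars.replace y (pvPat p2 d2) (pvRep sfx p2 d2)) := by
  intro p hp d hd
  apply pv_not_prefix_replace (pvPat p2 d2) (pvRep sfx p2 d2) (pvRt p d) (pv_pat_ne_nil p2 d2)
    (6 + p2.length) (pv_core_take sfx p2 d2) (by omega) (by simp [pvPat, pvH, pvT]; omega)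
    (pv_H_prefix_rep sfx p2 d2) (pv_rt_no_H hp hd) y (hy p hp d hd)

theorem pv_fold_cons_h {sfx : List Char} (hs : sfx ∈ pvSuffixes)
    (Q : List (List Char × List Char)) (hQ : ∀ q ∈ Q, q ∈ pvPairs sfx) :
    ∀ (y : List Char), pvInv y →
      Q.foldl pvRepl ('h' :: y) = 'h' :: Q.foldl pvRepl y ∧ pvInv (Q.foldl pvRepl y) := by
  induction Q with
  | nil => intro y hy; exact ⟨rfl, hy⟩
  | cons q Q ih =>
    intro y hy
    obtain ⟨p2, d2, hp2, hd2, hq2⟩ := pv_mem_pairs (hQ q (by simp))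
    subst hq2
    have hstep : pvRepl ('h' :: y) (pvPat p2 d2, pvRep sfx p2 d2)
        = 'h' :: pvRepl y (pvPat p2 d2, pvRep sfx p2 d2) := by
      apply pv_replace_cons _ _ (pv_pat_ne_nil p2 d2)
      rw [pv_pat_eq_cons]
      intro hpre
      rw [List.cons_prefix_cons] at hpre
      exact hy p2 hp2 d2 hd2 hpre.2
    have hinv : pvInv (pvRepl y (pvPat p2 d2, pvRep sfx p2 d2)) := pv_inv_preserved sfx p2 d2 hy
    rw [List.foldl_cons, List.foldl_cons, hstep]
    exact ih (fun q hq => hQ q (by simp [hq])) _ hinv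

theorem pv_fold_cons_ne {sfx : List Char} (Q : List (List Char × List Char))
    (hQ : ∀ q ∈ Q, q ∈ pvPairs sfx) (c : Char) (hc : c ≠ 'h') :
    ∀ (y : List Char), Q.foldl pvRepl (c :: y) = c :: Q.foldl pvRepl y := by
  induction Q with
  | nil => intro y; rfl
  | cons q Q ih =>
    intro y
    obtain ⟨p2, d2, _, _, hq2⟩ := pv_mem_pairs (hQ q (by simp))
    subst hq2
    have hstep : pvRepl (c :: y) (pvPat p2 d2, pvRep sfx p2 d2)
        = c :: pvRepl y (pvPat p2 d2, pvRep sfx p2 d2) := by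
      apply pv_replace_cons _ _ (pv_pat_ne_nil p2 d2)
      rw [pv_pat_eq_cons]
      intro hpre
      rw [List.cons_prefix_cons] at hpre
      exact hc hpre.1.symm
    rw [List.foldl_cons, List.foldl_cons, hstep]
    exact ih (fun q hq => hQ q (by simp [hq])) _

-- A's page-fold equals the flat 27-pair fold
theorem pv_foldA_eq_foldP (sfx : List Char) : ∀ (L : List (List Char)) (s : List Char),
    L.foldl (pvStep3 sfx) s = (L.flatMap (pvTriple sfx)).foldl pvRepl s := by
  intro L
  induction L with
  | nil => intro s; rfl
  | cons p L ih =>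
    intro s
    rw [List.foldl_cons, List.flatMap_cons, List.foldl_append, ih]
    rfl

-- ---------- the main equivalence of the two cores ----------

theorem pvScan_nil (sfx : List Char) : pvScan sfx [] = [] := by
  rw [pvScan]
  split
  · next p hp => rw [show pvMatchPage [] = none from rfl] at hp; cases hp
  · rfl

theorem pvScan_match {s p : List Char} (sfx : List Char) (h : pvMatchPage s = some p) :
    pvScan sfx s = pvH ++ p ++ sfx ++ pvT ++ pvScan sfx (s.drop (11 + p.length)) := by
  rw [pvScan]
  split
  · next p' hp' => rw [hp'] at h; cases h; rfl
  · next hn => rw [hn] at h; cases h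

theorem pvScan_nomatch {c : Char} {t : List Char} (sfx : List Char) (h : pvMatchPage (c :: t) = none) :
    pvScan sfx (c :: t) = c :: pvScan sfx t := by
  rw [pvScan]
  split
  · next p' hp' => rw [h] at hp'; cases hp'
  · rfl

theorem pv_pairs_ne_nil {sfx : List Char} : ∀ q ∈ pvPairs sfx, q.1 ≠ [] := by
  intro q hq
  obtain ⟨p2, d2, _, _, hq2⟩ := pv_mem_pairs hq
  rw [hq2]
  exact pv_pat_ne_nil p2 d2

theorem pv_len_HT (p : List Char) : (pvH ++ p ++ pvT).length = 11 + p.length := by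
  simp [pvH, pvT]
  omega

theorem pv_main {sfx : List Char} (hs : sfx ∈ pvSuffixes) :
    ∀ (n : Nat) (s : List Char), s.length ≤ n → (pvPairs sfx).foldl pvRepl s = pvScan sfx s := by
  intro n
  induction n with
  | zero =>
    intro s hn
    have hnil : s = [] := by cases s <;> simp_all
    subst hnil
    rw [pv_fold_nil _ pv_pairs_ne_nil, pvScan_nil]
  | succ n ih =>
    intro s hn
    cases hm : pvMatchPage s with
    | some p =>
      have hpmem := List.mem_of_find?_eq_some hm
      have hpred := List.find?_some hm
      simp only [Bool.and_eq_true, List.isPrefixOf_iff_prefix] at hpred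
      obtain ⟨hpre, hdel⟩ := hpred
      obtain ⟨rest, hrest⟩ := hpre
      have hdropr : s.drop (11 + p.length) = rest := by
        rw [← hrest, ← pv_len_HT p]
        exact List.drop_left
      rw [hdropr] at hdel
      cases rest with
      | nil => simp at hdel
      | cons d r =>
        simp only [List.head?_cons, Bool.or_eq_true, beq_iff_eq] at hdel
        have hdmem : d ∈ pvDelims := by
          rcases hdel with (h | h) | h <;> subst h <;> decide
        have hs_eq : s = pvPat p d ++ r := by
          rw [← hrest, pvPat]
          simp
        have hrlen : r.length ≤ n := by
          have h2 := congrArg List.length hs_eq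
          simp only [pvPat, pvH, pvT, List.length_append, List.length_cons, List.length_nil] at h2
          omega
        have hdone : pvMatchPage (d :: r) = none := by
          apply List.find?_eq_none.mpr
          intro p2 hp2
          have hne : (pvH ++ p2 ++ pvT).isPrefixOf (d :: r) = false := by
            rw [← Bool.not_eq_true, List.isPrefixOf_iff_prefix]
            intro hpre2
            have hcons : pvH ++ p2 ++ pvT = 'h' :: (['r', 'e', 'f', '=', '"'] ++ p2 ++ pvT) := rfl
            rw [hcons, List.cons_prefix_cons] at hpre2
            have : d ≠ 'h' := by
              simp only [pvDelims, List.mem_cons, List.not_mem_nil, or_false] at hdmem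
              rcases hdmem with h | h | h <;> subst h <;> decide
            exact this hpre2.1.symm
          intro hpred2
          simp only [Bool.and_eq_true] at hpred2
          rw [hne] at hpred2
          exact absurd hpred2.1 (by simp)
        rw [pvScan_match sfx hm, hdropr, pvScan_nomatch sfx hdone, ← ih r hrlen,
          hs_eq, pv_fold_match hs hpmem hdmem r]
        simp [pvRep]
    | none =>
      cases s with
      | nil => rw [pv_fold_nil _ pv_pairs_ne_nil, pvScan_nil]
      | cons c t =>
        have hnone := List.find?_eq_none.mp hm
        have htlen : t.length ≤ n := by simpa using hn
        by_cases hc : c = 'h'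
        · subst hc
          have hinv : pvInv t := by
            intro p hp2 d hd2 hrt
            obtain ⟨z, hz⟩ := hrt
            apply hnone p hp2
            have ht : 'h' :: t = (pvH ++ p ++ pvT) ++ (d :: z) := by
              rw [← hz, pvRt]
              simp [pvH]
            have hpre2 : (pvH ++ p ++ pvT).isPrefixOf ('h' :: t) = true := by
              rw [List.isPrefixOf_iff_prefix, ht]
              exact List.prefix_append _ _
            have hdrop2 : ('h' :: t).drop (11 + p.length) = d :: z := by
              rw [ht, ← pv_len_HT p]
              exact List.drop_left
            rw [hpre2, hdrop2]
            simp only [List.head?_cons, Bool.true_and]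
            simp only [pvDelims, List.mem_cons, List.not_mem_nil, or_false] at hd2
            rcases hd2 with h | h | h <;> subst h <;> decide
          rw [(pv_fold_cons_h hs (pvPairs sfx) (fun q hq => hq) t hinv).1,
            pvScan_nomatch sfx hm, ih t htlen]
        · rw [pv_fold_cons_ne (pvPairs sfx) (fun q hq => hq) c hc t,
            pvScan_nomatch sfx hm, ih t htlen]

theorem pv_port_case (content : String) (S : String) (lang : String)
    (hne : (lang == "en") = false)
    (hL : (pvLangs.get? lang).map (fun m => m.getD "suffix" "") = some S)
    (hS : S.toList ∈ pvSuffixes) :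
    update_internal_links content lang = update_internal_links_alt content lang := by
  have hne' : ¬ ((lang == "en") = true) := by simp [hne]
  unfold update_internal_links update_internal_links_alt
  rw [if_neg hne']
  rw [if_neg hne']
  cases hg : pvLangs.get? lang with
  | none => simp [hg] at hL
  | some m =>
    rw [hg] at hL
    simp only [Option.map_some, Option.some.injEq] at hL
    have e1 : (match some m with
        | none => content
        | some m =>
          have suffix := m.getD "suffix" "";
          String.ofList (List.foldl (pvStep3 suffix.toList) content.toList pvPages))
        = String.ofList (List.foldl (pvStep3 (m.getD "suffix" "").toList) content.toList pvPages) := rfl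
    have e2 : (match some m with
        | none => content
        | some m => String.ofList (pvScan (m.getD "suffix" "").toList content.toList))
        = String.ofList (pvScan (m.getD "suffix" "").toList content.toList) := rfl
    rw [e1, e2, hL]
    refine congrArg String.ofList ?_
    rw [pv_foldA_eq_foldP S.toList pvPages content.toList]
    exact pv_main hS content.toList.length content.toList le_rfl

-- ===== VERDICT (by name: the statement is the Claim_ definition above) =====
theorem update_internal_links_spec : Claim_equal_update_internal_links := by
  intro content lang _ hpre
  unfold Spec_update_internal_links
  unfold Pre_update_internal_links at hpre
  simp only [List.mem_cons, List.not_mem_nil, or_false] at hpre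
  rcases hpre with rfl | rfl | rfl | rfl | rfl | rfl
  · have h : (("en" : String) == "en") = true := by decide
    unfold update_internal_links update_internal_links_alt
    rw [if_pos h, if_pos h]
  · exact pv_port_case content "_bn" "bn" (by decide) rfl (by decide)
  · exact pv_port_case content "_de" "de" (by decide) rfl (by decide)
  · exact pv_port_case content "_es" "es" (by decide) rfl (by decide)
  · exact pv_port_case content "_zh" "zh" (by decide) rfl (by decide)
  · exact pv_port_case content "_ja" "ja" (by decide) rfl (by decide)
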